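-- pv_equiv track=rewrite | github.com/TomWoah123/Cryptography-Project | key_expansion.py | convert_string_to_bytes
-- ===== SOURCE A (Python) =====
-- def convert_string_to_bytes(string: str) -> list:
--     """
--     This function takes a string of valid hexadecimal numbers and converting it to a list of bytes.
--     Examples:
--         00 -> [0, 0, 0, 0, 0, 0, 0, 0]
--         11 -> [1, 0, 0, 0, 1, 0, 0, 0]
--         1C -> [0, 0, 1, 1, 1, 0, 0, 0]
--     Notice how the bit values are in ascending order from the list to stay consistent with the xor function used by the
--     aes.py file
--     :param string: The string of valid hexadecimal numbers
--     :return: A list of bytes (The bytes are a list of bits of size 8)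
--     """
--     bytes_list = []
--     for index in range(0, len(string), 2):
--         byte = string[index:index + 2]
--         byte = int(byte, 16)
--         byte = format(byte, '#010b')[2:]
--         byte = list(byte)
--         byte.reverse()
--         for b_index in range(len(byte)):
--             byte[b_index] = int(byte[b_index])
--         bytes_list.append(byte)
--     return bytes_list
-- ===== SOURCE B (Python) =====
-- def convert_string_to_bytes(string: str) -> list:
--     digits = "0123456789abcdef"
--     bytes_list = []
--     for index in range(0, len(string), 2):
--         value = 0
--         for ch in string[index:index + 2]:
--             value = value * 16 + digits.index(ch.lower())
--         bytes_list.append([(value >> k) & 1 for k in range(8)])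
--     return bytes_list
-- ===== Notes on version B (the rewrite author's own statement) =====
-- stated objective: simpler
-- what changed: Each byte is now built by a hand-rolled base-16 digit accumulator and direct bit extraction ((value >> k) & 1 for k in range(8)) instead of A's format-string/slice/list/reverse/int-per-char pipeline, so no binary string is ever constructed or reversed.
-- outside the precondition, e.g. on convert_string_to_bytes(' 7'): A returns [[1, 1, 1, 0, 0, 0, 0, 0]], B raises ValueError; on convert_string_to_bytes('+5'): A returns [[1, 0, 1, 0, 0, 0, 0, 0]], B raises ValueError; on convert_string_to_bytes('-0'): A returns [[0, 0, 0, 0, 0, 0, 0, 0]], B raises ValueError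
import Mathlib
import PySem

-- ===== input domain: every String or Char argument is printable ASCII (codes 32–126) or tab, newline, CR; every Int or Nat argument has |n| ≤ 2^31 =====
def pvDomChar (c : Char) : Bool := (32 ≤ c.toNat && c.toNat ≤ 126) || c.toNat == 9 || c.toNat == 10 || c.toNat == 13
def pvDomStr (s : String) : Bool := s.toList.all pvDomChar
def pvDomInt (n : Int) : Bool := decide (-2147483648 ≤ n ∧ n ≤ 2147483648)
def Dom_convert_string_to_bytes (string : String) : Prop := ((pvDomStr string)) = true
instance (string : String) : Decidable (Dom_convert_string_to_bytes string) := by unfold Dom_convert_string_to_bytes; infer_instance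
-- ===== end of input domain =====

-- B replaces A's format-string/slice/reverse/int-map pipeline per byte with a hand-rolled base-16
-- accumulator and direct LSB-first bit extraction ((value >> k) & 1) — objective: simpler (no speed claim).

-- ===== PORT A =====

-- format(v, '#010b') for 0 ≤ v: bin(v) with zeros padded in after the '0b' prefix to total width 10.
-- Exact for 0 ≤ v (Pre_ guarantees 0 ≤ v < 256 here; Python's sign placement for v < 0 is not modelled).
def pvFmt010b (v : Int) : List Char :=
  let s := PySem.Int.toBinChars0b v
  if s.length < 10 then s.take 2 ++ List.replicate (10 - s.length) '0' ++ s.drop 2 else s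

-- the body of A's loop: byte = int(byte,16); byte = format(byte,'#010b')[2:]; list; reverse; int each char.
-- none = the ValueError of int(byte, 16) (excluded by Pre_).
def pvAByte (byte : List Char) : Option (List Int) :=
  match PySem.Int.ofCharsBase? byte 16 with
  | none => none
  | some v =>
    let b1 := (pvFmt010b v).drop 2
    let b2 := b1.reverse
    some (b2.map (fun c => (PySem.Int.ofChars? [c]).getD 0))  -- int(byte[b_index]); getD unreachable on '0'/'1'

def convert_string_to_bytes (string : String) : List (List Int) :=
  (PySem.List.pyRange 0 (PySem.Str.len string) 2).foldl
    (fun bytes_list index =>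
      match pvAByte (PySem.List.slice string.toList (some index) (some (index + 2))) with
      | none => bytes_list          -- Python raises ValueError here; excluded by Pre_
      | some byte => bytes_list ++ [byte])
    []

-- ===== PORT B =====

def pvHexTable : List Char := "0123456789abcdef".toList   -- digits = "0123456789abcdef"

-- the body of B's loop: value = 0; for ch in chunk: value = value*16 + digits.index(ch.lower());
-- then [(value >> k) & 1 for k in range(8)].  none = the ValueError of digits.index (excluded by Pre_).
def pvBByte (byte : List Char) : Option (List Int) :=
  match byte.foldl (fun acc ch =>
      match acc, PySem.List.index? pvHexTable (PySem.Chars.lowerChar ch) with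
      | some v, some d => some (v * 16 + (d : Int))
      | _, _ => none) (some 0) with
  | none => none
  | some v => some ((PySem.List.pyRange 0 8 1).map (fun k => PySem.Int.band (v >>> k.toNat) 1))

def convert_string_to_bytes_alt (string : String) : List (List Int) :=
  (PySem.List.pyRange 0 (PySem.Str.len string) 2).foldl
    (fun bytes_list index =>
      match pvBByte (PySem.List.slice string.toList (some index) (some (index + 2))) with
      | none => bytes_list          -- Python raises ValueError here; excluded by Pre_
      | some byte => bytes_list ++ [byte])
    []

-- ===== PRECONDITION & SPEC =====

def pvHexChars : List Char := "0123456789abcdefABCDEF".toList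

-- Pre_ excludes strings with any non-hex-digit character: there A usually raises ValueError in
-- int(byte, 16), and on the few chunks int's lenient parsing still accepts (whitespace, a sign,
-- as in ' 7', '+5' or '-0') A's returning is an artefact of int(x, 16)'s tolerance — B raises
-- ValueError on all of them.
def Pre_convert_string_to_bytes (string : String) : Prop :=
  (string.toList.all (fun c => decide (c ∈ pvHexChars))) = true
instance (string : String) : Decidable (Pre_convert_string_to_bytes string) := by
  unfold Pre_convert_string_to_bytes; infer_instance

def pvWitness_convert_string_to_bytes : String := "1Cf"

def Spec_convert_string_to_bytes (string : String) (out : List (List Int)) : Prop :=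
  out = convert_string_to_bytes_alt string
instance (string : String) (out : List (List Int)) : Decidable (Spec_convert_string_to_bytes string out) := by
  unfold Spec_convert_string_to_bytes; infer_instance

-- ===== CLAIM (what is proved, stated in full; the proofs are below) =====
def Claim_equal_convert_string_to_bytes : Prop := ∀ (string : String), Dom_convert_string_to_bytes string → Pre_convert_string_to_bytes string → Spec_convert_string_to_bytes string (convert_string_to_bytes string)

-- ===== LEMMAS AND PROOFS =====

set_option maxRecDepth 40000 in
theorem pvByte_eq_one :
    (pvHexChars.all fun c => pvAByte [c] == pvBByte [c]) = true := by decide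

set_option maxRecDepth 40000 in
theorem pvByte_eq_two :
    (pvHexChars.all fun c => pvHexChars.all fun d => pvAByte [c, d] == pvBByte [c, d]) = true := by
  decide

theorem pvByte_eq {byte : List Char} (hne : byte ≠ []) (hlen : byte.length ≤ 2)
    (hhex : ∀ c ∈ byte, c ∈ pvHexChars) : pvAByte byte = pvBByte byte := by
  match byte, hne, hlen with
  | [c], _, _ =>
    have hc := hhex c (by simp)
    have h := List.all_eq_true.mp pvByte_eq_one c hc
    exact beq_iff_eq.mp h
  | [c, d], _, _ =>
    have hc := hhex c (by simp)
    have hd := hhex d (by simp)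
    have h := List.all_eq_true.mp (List.all_eq_true.mp pvByte_eq_two c hc) d hd
    exact beq_iff_eq.mp h
  | _ :: _ :: _ :: _, _, hlen => simp at hlen

-- ===== VERDICT (by name: the statement is the Claim_ definition above) =====
theorem convert_string_to_bytes_spec : Claim_equal_convert_string_to_bytes := by
  intro s _hdom hpre
  unfold Spec_convert_string_to_bytes convert_string_to_bytes convert_string_to_bytes_alt
  apply PySem.List.foldl_congr_mem
  intro acc i hi
  obtain ⟨h0, hlt, -⟩ := (PySem.List.mem_pyRange_iff_of_pos (by norm_num) i).mp hi
  rw [PySem.Str.len_eq] at hlt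
  have hlen_eq : s.toList.length = s.length := by simp
  have h02 : (0 : Int) ≤ i + 2 := by omega
  have hslice := PySem.List.slice_toNat s.toList h0 h02
  have hdrop : i.toNat < s.toList.length := by omega
  have hchunk_ne : PySem.List.slice s.toList (some i) (some (i + 2)) ≠ [] := by
    rw [hslice]
    have : (i + 2).toNat - i.toNat = 2 := by omega
    rw [this]
    have hd : (s.toList.drop i.toNat) ≠ [] := by
      simp [List.drop_eq_nil_iff]; omega
    cases hdd : s.toList.drop i.toNat with
    | nil => exact absurd hdd hd
    | cons a t => simp
  have hchunk_len : (PySem.List.slice s.toList (some i) (some (i + 2))).length ≤ 2 := by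
    rw [hslice]
    calc (List.take ((i+2).toNat - i.toNat) (s.toList.drop i.toNat)).length
        ≤ (i+2).toNat - i.toNat := List.length_take_le _ _
      _ ≤ 2 := by omega
  have hchunk_hex : ∀ c ∈ PySem.List.slice s.toList (some i) (some (i + 2)), c ∈ pvHexChars := by
    intro c hc
    have := List.all_eq_true.mp hpre c (PySem.List.mem_of_mem_slice _ _ _ hc)
    exact of_decide_eq_true this
  rw [pvByte_eq hchunk_ne hchunk_len hchunk_hex]
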